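-- pv_equiv track=rewrite | github.com/Levko99/Projekt-Seminar | PreSampling.py | Kombi1
-- ===== SOURCE A (Python) =====
-- def Kombi1(Flights, Aircrafttypes):
--     kombinationen = []
--     for i in Flights:
--         for j in Flights:
--             for t in Aircrafttypes:
--                 kombinationen.append([i, j, 0, t])
--                 kombinationen.append([i, j, 1, t])
--     return len(kombinationen)
-- ===== SOURCE B (Python) =====
-- def Kombi1(Flights, Aircrafttypes):
--     return len(Flights) ** 2 * len(Aircrafttypes) * 2
-- ===== Notes on version B (the rewrite author's own statement) =====
-- stated objective: faster
-- what changed: B returns the closed form len(Flights)**2 * len(Aircrafttypes) * 2 instead of materialising the full list of combinations and taking its length.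
import Mathlib
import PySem

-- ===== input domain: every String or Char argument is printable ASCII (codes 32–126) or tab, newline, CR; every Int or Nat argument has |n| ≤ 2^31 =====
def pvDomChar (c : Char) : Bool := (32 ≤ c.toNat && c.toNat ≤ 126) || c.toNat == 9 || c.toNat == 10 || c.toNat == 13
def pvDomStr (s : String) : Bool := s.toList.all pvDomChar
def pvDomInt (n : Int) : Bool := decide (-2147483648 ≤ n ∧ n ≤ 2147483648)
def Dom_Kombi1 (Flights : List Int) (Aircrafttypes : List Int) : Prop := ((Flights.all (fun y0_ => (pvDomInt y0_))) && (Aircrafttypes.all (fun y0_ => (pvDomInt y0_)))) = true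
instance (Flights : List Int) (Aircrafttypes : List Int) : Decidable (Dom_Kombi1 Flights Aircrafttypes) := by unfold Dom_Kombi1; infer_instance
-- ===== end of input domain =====

-- ===== PORT A =====
-- literal port of A: build the list of combinations with three nested folds, return its length
def Kombi1 (Flights : List Int) (Aircrafttypes : List Int) : Int :=
  let kombinationen : List (List Int) :=
    Flights.foldl (fun acc i =>
      Flights.foldl (fun acc j =>
        Aircrafttypes.foldl (fun acc t =>
          (acc ++ [[i, j, 0, t]]) ++ [[i, j, 1, t]]) acc) acc) []
  (kombinationen.length : Int)

-- ===== PORT B =====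
def Kombi1_alt (Flights : List Int) (Aircrafttypes : List Int) : Int :=
  (Flights.length : Int) ^ 2 * (Aircrafttypes.length : Int) * 2

-- ===== PRECONDITION & SPEC =====
def Spec_Kombi1 (Flights : List Int) (Aircrafttypes : List Int) (out : Int) : Prop := out = Kombi1_alt Flights Aircrafttypes
instance (Flights : List Int) (Aircrafttypes : List Int) (out : Int) : Decidable (Spec_Kombi1 Flights Aircrafttypes out) := by unfold Spec_Kombi1; infer_instance

-- ===== CLAIM (what is proved, stated in full; the proofs are below) =====
def Claim_equal_Kombi1 : Prop := ∀ (Flights : List Int) (Aircrafttypes : List Int), Dom_Kombi1 Flights Aircrafttypes → Spec_Kombi1 Flights Aircrafttypes (Kombi1 Flights Aircrafttypes)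

-- ===== LEMMAS AND PROOFS =====
lemma inner_len (Aircrafttypes : List Int) (i j : Int) (acc : List (List Int)) :
    (Aircrafttypes.foldl (fun acc t => (acc ++ [[i, j, 0, t]]) ++ [[i, j, 1, t]]) acc).length
      = acc.length + 2 * Aircrafttypes.length := by
  induction Aircrafttypes generalizing acc with
  | nil => simp
  | cons t ts ih =>
      simp only [List.foldl_cons, ih, List.length_append, List.length_cons]
      simp; omega

lemma mid_len (Flights Aircrafttypes : List Int) (i : Int) (acc : List (List Int)) :
    (Flights.foldl (fun acc j =>
        Aircrafttypes.foldl (fun acc t => (acc ++ [[i, j, 0, t]]) ++ [[i, j, 1, t]]) acc) acc).length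
      = acc.length + Flights.length * (2 * Aircrafttypes.length) := by
  induction Flights generalizing acc with
  | nil => simp
  | cons j js ih =>
      simp only [List.foldl_cons, ih, inner_len, List.length_cons]
      ring

lemma outer_len (Fs Flights Aircrafttypes : List Int) (acc : List (List Int)) :
    (Fs.foldl (fun acc i =>
        Flights.foldl (fun acc j =>
          Aircrafttypes.foldl (fun acc t => (acc ++ [[i, j, 0, t]]) ++ [[i, j, 1, t]]) acc) acc) acc).length
      = acc.length + Fs.length * (Flights.length * (2 * Aircrafttypes.length)) := by
  induction Fs generalizing acc with
  | nil => simp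
  | cons i is ih =>
      simp only [List.foldl_cons, ih, mid_len, List.length_cons]
      ring

-- ===== VERDICT (by name: the statement is the Claim_ definition above) =====
theorem Kombi1_spec : Claim_equal_Kombi1 := by
  intro Flights Aircrafttypes _
  show (_ : Int) = _
  unfold Kombi1 Kombi1_alt
  simp only [outer_len, List.length_nil, Nat.zero_add]
  push_cast
  ring
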